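-- pv_equiv track=rewrite | github.com/justinchiu/tinker-cookbook | tinker_cookbook/recipes/math_efficiency/plot_learning_curve.py | _infer_step_for_final
-- ===== SOURCE A (Python) =====
-- def _infer_step_for_final(steps: list[int]) -> int:
--     if not steps:
--         return 0
--     steps_sorted = sorted(steps)
--     if len(steps_sorted) == 1:
--         return steps_sorted[0] + 1
--     deltas = [b - a for a, b in zip(steps_sorted, steps_sorted[1:]) if b > a]
--     step_delta = min(deltas) if deltas else 1
--     return steps_sorted[-1] + step_delta
-- ===== SOURCE B (Python) =====
-- def _infer_step_for_final(steps: list[int]) -> int: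
--     # Alternative: no sorting -- one max-tracking pass, then an all-pairs scan
--     # for the smallest strictly positive difference (default 1).
--     if not steps:
--         return 0
--     m = steps[0]
--     for v in steps[1:]:
--         if v > m:
--             m = v
--     best = None
--     for a in steps:
--         for b in steps:
--             d = b - a
--             if d > 0 and (best is None or d < best):
--                 best = d
--     return m + (best if best is not None else 1)
-- ===== Notes on version B (the rewrite author's own statement) =====
-- stated objective: alternative
-- what changed: B drops the sort entirely: one pass tracks the maximum and an all-pairs scan finds the smallest strictly positive difference (defaulting to 1), instead of sorting and scanning adjacent gaps.
import Mathlib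
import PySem

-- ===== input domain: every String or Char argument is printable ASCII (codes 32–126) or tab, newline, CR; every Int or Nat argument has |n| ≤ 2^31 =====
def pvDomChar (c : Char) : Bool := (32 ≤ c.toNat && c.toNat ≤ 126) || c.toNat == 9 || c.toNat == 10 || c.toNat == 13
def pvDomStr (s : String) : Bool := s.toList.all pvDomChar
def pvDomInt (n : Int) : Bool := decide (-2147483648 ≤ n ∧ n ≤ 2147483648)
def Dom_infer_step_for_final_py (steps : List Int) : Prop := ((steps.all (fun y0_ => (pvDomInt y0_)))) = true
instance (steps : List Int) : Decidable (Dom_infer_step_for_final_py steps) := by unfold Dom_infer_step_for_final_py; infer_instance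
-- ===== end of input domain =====

-- B drops A's sort: one max-tracking pass plus an all-pairs scan for the smallest
-- strictly positive difference (alternative algorithm, same exact result).


-- ===== PORT A =====
-- literal port of A: sort, special-case len 1, min of positive adjacent deltas, last + delta.
-- steps_sorted[0] / steps_sorted[-1] are ported with pyGetD (index always in range: the
-- list is nonempty there, so the default is never used).
def infer_step_for_final_py (steps : List Int) : Int :=
  if steps = [] then 0
  else
    let steps_sorted := PySem.List.sorted steps (fun x => x) false
    if steps_sorted.length = 1 then
      PySem.List.pyGetD steps_sorted 0 0 + 1
    else
      let deltas := ((steps_sorted.zip (PySem.List.slice steps_sorted (some 1) none)).filter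
          (fun p => decide (p.1 < p.2))).map (fun p => p.2 - p.1)
      let step_delta := (PySem.List.min? deltas (fun x => x)).getD 1
      PySem.List.pyGetD steps_sorted (-1) 0 + step_delta

-- ===== PORT B =====
-- literal port of Source B: running max over steps[1:], then nested loops tracking the
-- smallest strictly positive difference b - a (best : Option Int, none = Python None).
-- bestUpdate is exactly the body of the inner loop: "if d > 0 and (best is None or d < best): best = d"
def bestUpdate (best : Option Int) (d : Int) : Option Int :=
  if 0 < d then
    match best with
    | none => some d
    | some x => if d < x then some d else some x
  else best

def infer_step_for_final_py_alt (steps : List Int) : Int :=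
  match steps with
  | [] => 0
  | m0 :: rest =>
    let m := rest.foldl (fun m v => if m < v then v else m) m0
    let best := steps.foldl (fun best a =>
        steps.foldl (fun best b => bestUpdate best (b - a)) best)
      (none : Option Int)
    m + (match best with | some b => b | none => 1)

-- ===== PRECONDITION & SPEC =====
def Spec_infer_step_for_final_py (steps : List Int) (out : Int) : Prop := out = infer_step_for_final_py_alt steps
instance (steps : List Int) (out : Int) : Decidable (Spec_infer_step_for_final_py steps out) := by unfold Spec_infer_step_for_final_py; infer_instance

-- ===== CLAIM (what is proved, stated in full; the proofs are below) =====
def Claim_equal_infer_step_for_final_py : Prop := ∀ (steps : List Int), Dom_infer_step_for_final_py steps → Spec_infer_step_for_final_py steps (infer_step_for_final_py steps)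

-- ===== LEMMAS AND PROOFS =====

-- B's nested fold is a fold of bestUpdate over the list of all pairwise differences
lemma pvFold_eq_pairs (steps : List Int) (acc : Option Int) :
    steps.foldl (fun best a =>
        steps.foldl (fun best b => bestUpdate best (b - a)) best) acc
    = (steps.flatMap (fun a => steps.map (fun b => b - a))).foldl bestUpdate acc := by
  rw [List.foldl_flatMap]
  congr 1
  funext acc' a
  rw [List.foldl_map]

lemma bestUpdate_none_iff (D : List Int) : ∀ acc, D.foldl bestUpdate acc = none ↔ (acc = none ∧ ∀ d ∈ D, d ≤ 0) := by
  induction D with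
  | nil => intro acc; simp
  | cons d D ih =>
    intro acc
    simp only [List.foldl_cons, ih]
    constructor
    · rintro ⟨h1, h2⟩
      unfold bestUpdate at h1
      by_cases hd : 0 < d
      · rw [if_pos hd] at h1
        cases acc with
        | none => simp at h1
        | some x =>
          simp only at h1
          by_cases hdx : d < x
          · rw [if_pos hdx] at h1; exact absurd h1 (by simp)
          · rw [if_neg hdx] at h1; exact absurd h1 (by simp)
      · rw [if_neg hd] at h1
        refine ⟨h1, fun e he => ?_⟩
        rcases List.mem_cons.1 he with rfl | he
        · omega
        · exact h2 e he
    · rintro ⟨rfl, h2⟩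
      have hd : d ≤ 0 := h2 d (by simp)
      refine ⟨?_, fun e he => h2 e (by simp [he])⟩
      unfold bestUpdate
      rw [if_neg (by omega)]

lemma bestUpdate_some_mem (D : List Int) : ∀ acc m, D.foldl bestUpdate acc = some m → acc = some m ∨ (m ∈ D ∧ 0 < m) := by
  induction D with
  | nil => intro acc m h; simp_all
  | cons d D ih =>
    intro acc m h
    rcases ih _ _ h with h1 | h1
    · unfold bestUpdate at h1
      by_cases hd : 0 < d
      · rw [if_pos hd] at h1
        cases acc with
        | none =>
          right
          simp only [Option.some_inj] at h1
          exact ⟨by simp [← h1], by omega⟩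
        | some x =>
          simp only at h1
          split at h1
          · right
            simp only [Option.some_inj] at h1
            exact ⟨by simp [← h1], by omega⟩
          · left; exact h1
      · rw [if_neg hd] at h1
        left; exact h1
    · right; exact ⟨List.mem_cons_of_mem _ h1.1, h1.2⟩

lemma bestUpdate_le_acc (D : List Int) : ∀ acc x m, D.foldl bestUpdate acc = some m → acc = some x → m ≤ x := by
  induction D with
  | nil => intro acc x m h hx; simp_all
  | cons d D ih =>
    intro acc x m h hx
    subst hx
    have hstep : ∃ y, bestUpdate (some x) d = some y ∧ y ≤ x := by
      unfold bestUpdate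
      split
      · simp only
        split
        · exact ⟨d, rfl, by omega⟩
        · exact ⟨x, rfl, le_refl x⟩
      · exact ⟨x, rfl, le_refl x⟩
    rcases hstep with ⟨y, hy, hyx⟩
    simp only [List.foldl_cons, hy] at h
    exact le_trans (ih _ y m h rfl) hyx

lemma bestUpdate_isMin (D : List Int) : ∀ acc m, D.foldl bestUpdate acc = some m → ∀ d ∈ D, 0 < d → m ≤ d := by
  induction D with
  | nil => intro acc m h d hd; simp_all
  | cons e D ih =>
    intro acc m h d hd hdpos
    rcases List.mem_cons.1 hd with rfl | hd
    · -- d = e : after the first step the accumulator is some y with y ≤ d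
      have hstep : ∃ y, bestUpdate acc d = some y ∧ y ≤ d := by
        unfold bestUpdate
        rw [if_pos hdpos]
        cases acc with
        | none => exact ⟨d, rfl, le_refl d⟩
        | some x =>
          simp only
          split
          · exact ⟨d, rfl, le_refl d⟩
          · exact ⟨x, rfl, by omega⟩
      rcases hstep with ⟨y, hy, hyd⟩
      simp only [List.foldl_cons, hy] at h
      exact le_trans (bestUpdate_le_acc D _ y m h rfl) hyd
    · exact ih _ m h d hd hdpos

-- the running-max loop of B computes a member that bounds every element
lemma pvMax_spec (rest : List Int) : ∀ m0 : Int,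
    (rest.foldl (fun m v => if m < v then v else m) m0 = m0 ∨
       rest.foldl (fun m v => if m < v then v else m) m0 ∈ rest) ∧
    m0 ≤ rest.foldl (fun m v => if m < v then v else m) m0 ∧
    ∀ v ∈ rest, v ≤ rest.foldl (fun m v => if m < v then v else m) m0 := by
  induction rest with
  | nil => intro m0; simp
  | cons w rest ih =>
    intro m0
    simp only [List.foldl_cons]
    rcases ih (if m0 < w then w else m0) with ⟨hmem, hle, hub⟩
    constructor
    · rcases hmem with h | h
      · rw [h]; split
        · right; simp
        · left; rfl
      · right; exact List.mem_cons_of_mem _ h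
    constructor
    · refine le_trans ?_ hle; split <;> omega
    · intro v hv
      rcases List.mem_cons.1 hv with rfl | hv
      · refine le_trans ?_ hle; split <;> omega
      · exact hub v hv

-- in a ≤-sorted nonempty list the last element bounds every member
lemma pvLast_ub (s : List Int) : ∀ (h : s ≠ []), s.Pairwise (· ≤ ·) → ∀ y ∈ s, y ≤ s.getLast h := by
  induction s with
  | nil => intro h; simp at h
  | cons x s ih =>
    intro h hp y hy
    cases s with
    | nil => simp_all
    | cons z t =>
      rw [List.getLast_cons (by simp)]
      rcases List.mem_cons.1 hy with rfl | hy
      · have hx : ∀ v ∈ z :: t, y ≤ v := (List.pairwise_cons.1 hp).1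
        exact le_trans (hx z (by simp)) (ih (by simp) (List.pairwise_cons.1 hp).2 z (by simp))
      · exact ih (by simp) (List.pairwise_cons.1 hp).2 y hy

-- every adjacent delta of the sorted list is a positive pairwise difference of steps
lemma pvDelta_is_pair (steps : List Int) (g : Int)
    (hg : g ∈ ((((PySem.List.sorted steps (fun x => x) false).zip (PySem.List.sorted steps (fun x => x) false).tail).filter
          (fun p => decide (p.1 < p.2))).map (fun p => p.2 - p.1))) :
    ∃ a ∈ steps, ∃ b ∈ steps, g = b - a ∧ 0 < g := by
  rcases List.mem_map.1 hg with ⟨⟨a, b⟩, hab, rfl⟩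
  rcases List.mem_filter.1 hab with ⟨hzip, hlt⟩
  have hlt : a < b := by simpa using hlt
  have hmem := List.of_mem_zip hzip
  refine ⟨a, ?_, b, ?_, rfl, by omega⟩
  · exact (PySem.List.mem_sorted _ _ _ _).1 hmem.1
  · exact (PySem.List.mem_sorted _ _ _ _).1 (List.mem_of_mem_tail hmem.2)

-- every positive pairwise difference dominates some positive adjacent delta of a sorted list
lemma pvPair_dominates (s : List Int) (hs : s.Pairwise (· ≤ ·)) :
    ∀ a ∈ s, ∀ b ∈ s, a < b →
      ∃ p ∈ s.zip s.tail, p.1 < p.2 ∧ p.2 - p.1 ≤ b - a := by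
  induction s with
  | nil => intro a ha; simp at ha
  | cons z rest ih =>
    intro a ha b hb hab
    have hz : ∀ v ∈ rest, z ≤ v := (List.pairwise_cons.1 hs).1
    have hrest : rest.Pairwise (· ≤ ·) := (List.pairwise_cons.1 hs).2
    have hsub : ∀ p ∈ rest.zip rest.tail, p ∈ (z :: rest).zip (z :: rest).tail := by
      intro p hp
      cases rest with
      | nil => simp at hp
      | cons w t => exact List.mem_cons_of_mem _ hp
    by_cases hbr : b ∈ rest
    · by_cases har : a ∈ rest
      · rcases ih hrest a har b hbr hab with ⟨p, hp, h1, h2⟩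
        exact ⟨p, hsub p hp, h1, h2⟩
      · -- a = z, b ∈ rest
        have haz : a = z := by
          rcases List.mem_cons.1 ha with h | h
          · exact h
          · exact absurd h har
        subst haz
        cases rest with
        | nil => simp at hbr
        | cons w t =>
          by_cases hzw : a < w
          · refine ⟨(a, w), by simp, hzw, ?_⟩
            have hwb : w ≤ b := by
              rcases List.mem_cons.1 hbr with rfl | hbt
              · exact le_refl b
              · exact (List.pairwise_cons.1 hrest).1 b hbt
            omega
          · have haw : a = w := le_antisymm (hz w (by simp)) (by omega)
            rcases ih hrest a (by rw [haw]; simp) b hbr hab with ⟨p, hp, h1, h2⟩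
            exact ⟨p, hsub p hp, h1, h2⟩
    · -- b = z : impossible, z is minimal and a ∈ z :: rest with a < b
      have hbz : b = z := by
        rcases List.mem_cons.1 hb with h | h
        · exact h
        · exact absurd h hbr
      subst hbz
      rcases List.mem_cons.1 ha with rfl | har
      · omega
      · have := hz a har; omega

-- ===== VERDICT (by name: the statement is the Claim_ definition above) =====
theorem infer_step_for_final_py_spec : Claim_equal_infer_step_for_final_py := by
  intro steps _
  unfold Spec_infer_step_for_final_py
  cases steps with
  | nil => rfl
  | cons m0 rest =>
    simp only [infer_step_for_final_py, infer_step_for_final_py_alt,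
      if_neg (List.cons_ne_nil m0 rest), PySem.List.slice_from_one]
    -- abbreviations and shared facts
    set s := PySem.List.sorted (m0 :: rest) (fun x => x) false with hs
    have hpair : s.Pairwise (· ≤ ·) := PySem.List.sorted_pairwise (m0 :: rest) (fun x => x)
    have hmem_s : ∀ y : Int, y ∈ s ↔ y ∈ m0 :: rest := fun y => PySem.List.mem_sorted _ _ _ _
    have hne : s ≠ [] := by
      intro h
      exact List.cons_ne_nil m0 rest ((PySem.List.sorted_eq_nil_iff _ _ _).1 h)
    -- B's running max
    set m := rest.foldl (fun m v => if m < v then v else m) m0 with hm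
    obtain ⟨hMmem0, hMlb, hMub0⟩ := pvMax_spec rest m0
    have hMmem : m ∈ m0 :: rest := by
      rcases hMmem0 with h | h
      · rw [hm, h]; simp
      · exact List.mem_cons_of_mem _ (hm ▸ h)
    have hMub : ∀ y ∈ m0 :: rest, y ≤ m := by
      intro y hy
      rcases List.mem_cons.1 hy with rfl | hy
      · exact hm ▸ hMlb
      · exact hm ▸ hMub0 y hy
    -- B's pair fold over the list of all pairwise differences
    set P := (m0 :: rest).flatMap (fun a => (m0 :: rest).map (fun b => b - a)) with hP
    have hfold := pvFold_eq_pairs (m0 :: rest) none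
    have hPmem : ∀ d ∈ P, ∃ a ∈ m0 :: rest, ∃ b ∈ m0 :: rest, d = b - a := by
      intro d hd
      rcases List.mem_flatMap.1 (hP ▸ hd) with ⟨a, ha, hd2⟩
      rcases List.mem_map.1 hd2 with ⟨b, hb, rfl⟩
      exact ⟨a, ha, b, hb, rfl⟩
    have hPmem' : ∀ a ∈ m0 :: rest, ∀ b ∈ m0 :: rest, b - a ∈ P := by
      intro a ha b hb
      rw [hP]
      exact List.mem_flatMap.2 ⟨a, ha, List.mem_map.2 ⟨b, hb, rfl⟩⟩
    rw [pvFold_eq_pairs (m0 :: rest) none, ← hP]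
    by_cases hlen : s.length = 1
    · -- singleton sorted list: every element equals x, no positive difference
      rw [if_pos hlen]
      rcases List.length_eq_one_iff.1 hlen with ⟨x, hsx⟩
      have hall : ∀ y ∈ m0 :: rest, y = x := by
        intro y hy
        have := (hmem_s y).2 hy
        rw [hsx] at this
        simpa using this
      have hmx : m = x := hall m hMmem
      have hnone : P.foldl bestUpdate none = none := by
        rw [bestUpdate_none_iff]
        refine ⟨rfl, fun d hd => ?_⟩
        rcases hPmem d hd with ⟨a, ha, b, hb, rfl⟩
        rw [hall a ha, hall b hb]
        omega
      rw [hnone, hsx, hmx]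
      show x + 1 = x + 1
      rfl
    · rw [if_neg hlen]
      have hlast : PySem.List.pyGetD s (-1) 0 = m := by
        rw [PySem.List.pyGetD_neg_one s 0 hne]
        have h1 : s.getLast hne ≤ m := hMub _ ((hmem_s _).1 (List.getLast_mem hne))
        have h2 : m ≤ s.getLast hne := pvLast_ub s hne hpair m ((hmem_s m).2 hMmem)
        omega
      rw [hlast]
      cases hfc : P.foldl bestUpdate none with
      | none =>
        -- no positive pairwise difference: A's deltas list is empty, both add 1
        have hdel : (((s.zip s.tail).filter (fun p => decide (p.1 < p.2))).map
            (fun p => p.2 - p.1)) = [] := by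
          rw [List.eq_nil_iff_forall_not_mem]
          intro g hg
          rcases pvDelta_is_pair (m0 :: rest) g hg with ⟨a, ha, b, hb, rfl, hpos⟩
          have := (bestUpdate_none_iff P none).1 hfc |>.2 (b - a) (hPmem' a ha b hb)
          omega
        rw [hdel]
        rfl
      | some mv =>
        rcases bestUpdate_some_mem P none mv hfc with h | ⟨hmvP, hmvpos⟩
        · exact absurd h (by simp)
        rcases hPmem mv hmvP with ⟨a, ha, b, hb, heq⟩
        have hab : a < b := by omega
        rcases pvPair_dominates s hpair a ((hmem_s a).2 ha) b ((hmem_s b).2 hb) hab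
          with ⟨p, hp, hplt, hpd⟩
        have hgdel : p.2 - p.1 ∈ (((s.zip s.tail).filter (fun q => decide (q.1 < q.2))).map
            (fun q => q.2 - q.1)) :=
          List.mem_map.2 ⟨p, List.mem_filter.2 ⟨hp, by simpa using hplt⟩, rfl⟩
        cases hmq : PySem.List.min? (((s.zip s.tail).filter (fun q => decide (q.1 < q.2))).map
            (fun q => q.2 - q.1)) (fun x => x) with
        | none =>
          rw [PySem.List.min?_eq_none_iff] at hmq
          rw [hmq] at hgdel
          simp at hgdel
        | some mmin =>
          have hminmem := PySem.List.min?_mem hmq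
          have hminle : ∀ y ∈ (((s.zip s.tail).filter (fun q => decide (q.1 < q.2))).map
              (fun q => q.2 - q.1)), mmin ≤ y := PySem.List.min?_isMin hmq
          rcases pvDelta_is_pair (m0 :: rest) mmin hminmem with ⟨a', ha', b', hb', hmeq, hmpos⟩
          have hle1 : mv ≤ mmin := by
            have hmmP : mmin ∈ P := hmeq ▸ hPmem' a' ha' b' hb'
            exact bestUpdate_isMin P none mv hfc mmin hmmP hmpos
          have hle2 : mmin ≤ mv := le_trans (hminle _ hgdel) (by omega)
          show m + mmin = m + mv
          omega
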